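-- pv_equiv track=rewrite | github.com/yashwantram97/model-growth | depth-expansion/kernels/triton_indexer_streaming.py | _auto_chunk_size
-- ===== SOURCE A (Python) =====
-- def _auto_chunk_size(batch_size: int, seq_kv: int,
--                      target_bytes: int = 512 * 1024 * 1024) -> int:
--     """
--     Auto-select chunk size C so that (B, C, seq_kv) x 4 bytes < target_bytes.
--
--     Returns C rounded down to the nearest power of 2 for kernel efficiency,
--     capped at seq_kv (no chunking needed if C >= seq_kv).
--     """
--     bytes_per_row = batch_size * seq_kv * 4  # float32
--     if bytes_per_row == 0:
--         return 1
--     max_C = target_bytes // bytes_per_row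
--     # Round down to power of 2
--     C = 1
--     while C * 2 <= max_C:
--         C *= 2
--     return max(1, min(C, seq_kv))
-- ===== SOURCE B (Python) =====
-- def _auto_chunk_size(batch_size: int, seq_kv: int,
--                      target_bytes: int = 512 * 1024 * 1024) -> int:
--     bytes_per_row = batch_size * seq_kv * 4  # float32
--     if bytes_per_row == 0:
--         return 1
--     max_C = target_bytes // bytes_per_row
--     # largest power of two <= max_C, closed form (no loop); 1 when max_C < 1
--     C = 1 << (max_C.bit_length() - 1) if max_C >= 1 else 1
--     return max(1, min(C, seq_kv))
-- ===== Notes on version B (the rewrite author's own statement) =====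
-- stated objective: simpler
-- what changed: The doubling while-loop is replaced by a closed-form bit_length shift computing the largest power of two not exceeding max_C.
import Mathlib
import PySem

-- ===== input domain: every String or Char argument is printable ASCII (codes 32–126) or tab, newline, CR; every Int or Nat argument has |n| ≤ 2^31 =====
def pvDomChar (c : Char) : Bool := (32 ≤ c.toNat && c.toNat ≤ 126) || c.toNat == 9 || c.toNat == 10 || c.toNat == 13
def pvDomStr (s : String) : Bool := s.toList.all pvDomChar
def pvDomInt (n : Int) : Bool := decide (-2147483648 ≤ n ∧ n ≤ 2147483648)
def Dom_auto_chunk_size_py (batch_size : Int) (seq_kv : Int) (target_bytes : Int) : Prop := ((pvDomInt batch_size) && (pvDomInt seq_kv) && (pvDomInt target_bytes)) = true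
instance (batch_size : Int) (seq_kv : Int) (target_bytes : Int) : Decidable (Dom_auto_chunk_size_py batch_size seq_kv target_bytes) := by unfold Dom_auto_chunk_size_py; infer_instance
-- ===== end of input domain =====

-- B replaces A's doubling while-loop by a closed-form bit_length shift (simpler, loop-free).

-- ===== PORT A =====
-- the 'while C * 2 <= max_C: C *= 2' loop; fuel max_C.toNat is enough since the
-- loop runs at most log2(max_C) < max_C times
def pvLoopA : Nat → Int → Int → Int
  | 0, C, _ => C
  | f + 1, C, maxC => if C * 2 ≤ maxC then pvLoopA f (C * 2) maxC else C

def auto_chunk_size_py (batch_size : Int) (seq_kv : Int) (target_bytes : Int) : Int :=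
  let bytes_per_row := batch_size * seq_kv * 4
  if bytes_per_row = 0 then 1
  else
    let max_C := PySem.Int.floordiv target_bytes bytes_per_row
    let C := pvLoopA max_C.toNat 1 max_C
    max 1 (min C seq_kv)

-- ===== PORT B =====
def auto_chunk_size_py_alt (batch_size : Int) (seq_kv : Int) (target_bytes : Int) : Int :=
  let bytes_per_row := batch_size * seq_kv * 4
  if bytes_per_row = 0 then 1
  else
    let max_C := PySem.Int.floordiv target_bytes bytes_per_row
    -- 1 << (max_C.bit_length() - 1): for max_C ≥ 1, bit_length(n) = Nat.log2 n + 1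
    -- (exact on positive ints), so the shift is 2 ^ Nat.log2 max_C.toNat
    let C : Int := if 1 ≤ max_C then (2 : Int) ^ Nat.log2 max_C.toNat else 1
    max 1 (min C seq_kv)

-- ===== PRECONDITION & SPEC =====
def Spec_auto_chunk_size_py (batch_size : Int) (seq_kv : Int) (target_bytes : Int) (out : Int) : Prop := out = auto_chunk_size_py_alt batch_size seq_kv target_bytes
instance (batch_size : Int) (seq_kv : Int) (target_bytes : Int) (out : Int) : Decidable (Spec_auto_chunk_size_py batch_size seq_kv target_bytes out) := by unfold Spec_auto_chunk_size_py; infer_instance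

-- ===== CLAIM (what is proved, stated in full; the proofs are below) =====
def Claim_equal_auto_chunk_size_py : Prop := ∀ (batch_size : Int) (seq_kv : Int) (target_bytes : Int), Dom_auto_chunk_size_py batch_size seq_kv target_bytes → Spec_auto_chunk_size_py batch_size seq_kv target_bytes (auto_chunk_size_py batch_size seq_kv target_bytes)

-- ===== LEMMAS AND PROOFS =====

-- when the loop condition fails at once, the loop is the identity
theorem pvLoopA_stop (fuel : Nat) (C maxC : Int) (h : ¬ C * 2 ≤ maxC) :
    pvLoopA fuel C maxC = C := by
  cases fuel with
  | zero => rfl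
  | succ f => simp [pvLoopA, h]

-- 2^k ≤ maxC < 2^(k+1) pins Nat.log2 maxC.toNat = k
theorem pv_log2_eq (k : Nat) (maxC : Int) (h1 : (2 : Int) ^ k ≤ maxC)
    (h2 : maxC < 2 ^ (k + 1)) : Nat.log2 maxC.toNat = k := by
  have e1 : ((2 : Int) ^ k) = ((2 ^ k : Nat) : Int) := by push_cast; ring
  have e2 : ((2 : Int) ^ (k + 1)) = ((2 ^ (k + 1) : Nat) : Int) := by push_cast; ring
  rw [e1] at h1; rw [e2] at h2
  have ha : (2 ^ k : Nat) ≤ maxC.toNat := by omega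
  have hb : maxC.toNat < 2 ^ (k + 1) := by omega
  rw [Nat.log2_eq_log_two]
  exact Nat.log_eq_of_pow_le_of_lt_pow ha hb

-- main loop invariant: starting from C = 2^k with 2^k ≤ maxC and enough fuel,
-- the loop computes the largest power of two not exceeding maxC
theorem pvLoopA_pow (fuel : Nat) : ∀ (k : Nat) (maxC : Int),
    (2 : Int) ^ k ≤ maxC → maxC < 2 ^ (k + fuel + 1) →
    pvLoopA fuel ((2 : Int) ^ k) maxC = (2 : Int) ^ Nat.log2 maxC.toNat := by
  induction fuel with
  | zero =>
    intro k maxC h1 h2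
    rw [pvLoopA, pv_log2_eq k maxC h1 (by simpa using h2)]
  | succ f ih =>
    intro k maxC h1 h2
    by_cases h : (2 : Int) ^ k * 2 ≤ maxC
    · have e : (2 : Int) ^ k * 2 = 2 ^ (k + 1) := by ring
      rw [pvLoopA]
      simp only [h, if_pos]
      rw [e]
      apply ih (k + 1)
      · rw [← e]; exact h
      · have : k + 1 + f + 1 = k + (f + 1) + 1 := by omega
        rw [this]; exact h2
    · rw [pvLoopA]
      simp only [h, ite_false]
      have h2' : maxC < 2 ^ (k + 1) := by
        have e : (2 : Int) ^ (k + 1) = 2 ^ k * 2 := by ring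
        omega
      rw [pv_log2_eq k maxC h1 h2']

theorem pvLoop_closed (maxC : Int) :
    pvLoopA maxC.toNat 1 maxC =
      (if 1 ≤ maxC then (2 : Int) ^ Nat.log2 maxC.toNat else 1) := by
  by_cases h : 1 ≤ maxC
  · rw [if_pos h]
    have h1 : (2 : Int) ^ (0 : Nat) ≤ maxC := by simpa using h
    have hfuel : maxC < 2 ^ (0 + maxC.toNat + 1) := by
      have hlt : maxC.toNat < 2 ^ maxC.toNat := Nat.lt_two_pow_self
      have h3 : (maxC.toNat : Int) < (2 : Int) ^ maxC.toNat := by exact_mod_cast hlt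
      have hmono : (2 : Int) ^ maxC.toNat ≤ 2 ^ (0 + maxC.toNat + 1) := by
        apply pow_le_pow_right₀ (by norm_num) (by omega)
      omega
    have := pvLoopA_pow maxC.toNat 0 maxC h1 hfuel
    simpa using this
  · rw [if_neg h]
    exact pvLoopA_stop _ _ _ (by omega)

-- ===== VERDICT (by name: the statement is the Claim_ definition above) =====
theorem auto_chunk_size_py_spec : Claim_equal_auto_chunk_size_py := by
  intro batch_size seq_kv target_bytes _
  unfold Spec_auto_chunk_size_py auto_chunk_size_py auto_chunk_size_py_alt
  by_cases h : batch_size * seq_kv * 4 = 0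
  · simp [h]
  · simp only [h, ite_false]
    rw [pvLoop_closed]
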